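-- pv_equiv track=rewrite | github.com/shindavid/nba-betting | py/web.py | uncomment_commented_out_sections
-- ===== SOURCE A (Python) =====
-- from typing import Optional
--
-- def uncomment_commented_out_sections(html: str, url: str, limit: Optional[int] = None) -> str:
--     """
--     basketball-reference.com weirdly has various sections of the HTML commented out with <!-- and -->, with those
--     comment markers living in standalone lines. Those commented out sections contain required data. I believe the
--     website dynamically activates/deactivates those sections via javascript. This function removes those comments,
--     so that the bs4 parser parses those sections.
--
--     If limit is set, then asserts that the number of uncommented sections is less than or equal to limit.
--
--     The url is passed in solely to relay in debug messages.
--     """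
--     lines = html.splitlines()
--     comment_line_numbers = [i for i, line in enumerate(lines) if line.strip() == '<!--']
--     uncomment_line_numbers = [i for i, line in enumerate(lines) if line.strip() == '-->']
--
--     assert len(uncomment_line_numbers) == len(comment_line_numbers), url
--     if limit is not None:
--         assert len(uncomment_line_numbers) <= limit, url
--
--     if not comment_line_numbers:
--         return html
--
--     new_lines = []
--     i = -1
--     for a, b in zip(comment_line_numbers, uncomment_line_numbers):
--         assert a < b, url
--         new_lines.extend(lines[i+1:a])
--         new_lines.extend(lines[a+1:b])
--         i = b
--
--     new_lines.extend(lines[i+1:])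
--     return '\n'.join(new_lines)
-- ===== SOURCE B (Python) =====
-- from typing import Optional
--
-- def uncomment_commented_out_sections(html: str, url: str, limit: Optional[int] = None) -> str:
--     lines = html.splitlines()
--     comment_line_numbers = [i for i, line in enumerate(lines) if line.strip() == '<!--']
--     uncomment_line_numbers = [i for i, line in enumerate(lines) if line.strip() == '-->']
--
--     assert len(uncomment_line_numbers) == len(comment_line_numbers), url
--     if limit is not None:
--         assert len(uncomment_line_numbers) <= limit, url
--     for a, b in zip(comment_line_numbers, uncomment_line_numbers):
--         assert a < b, url
--
--     if not comment_line_numbers: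
--         return html
--
--     return '\n'.join(line for line in lines if line.strip() not in ('<!--', '-->'))
-- ===== Notes on version B (the rewrite author's own statement) =====
-- stated objective: simpler
-- what changed: B keeps the marker-index validation and the empty-marker early return, but replaces A's stateful interval-splicing loop (zip of paired indices, slice-extend, running boundary i) with a single flat pass that rebuilds the output by filtering out every standalone marker line.
-- outside the precondition, e.g. on uncomment_commented_out_sections('<!--\n<!--\n-->\n-->', 'u', None): A returns '<!--\n-->', B returns ''
import Mathlib
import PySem

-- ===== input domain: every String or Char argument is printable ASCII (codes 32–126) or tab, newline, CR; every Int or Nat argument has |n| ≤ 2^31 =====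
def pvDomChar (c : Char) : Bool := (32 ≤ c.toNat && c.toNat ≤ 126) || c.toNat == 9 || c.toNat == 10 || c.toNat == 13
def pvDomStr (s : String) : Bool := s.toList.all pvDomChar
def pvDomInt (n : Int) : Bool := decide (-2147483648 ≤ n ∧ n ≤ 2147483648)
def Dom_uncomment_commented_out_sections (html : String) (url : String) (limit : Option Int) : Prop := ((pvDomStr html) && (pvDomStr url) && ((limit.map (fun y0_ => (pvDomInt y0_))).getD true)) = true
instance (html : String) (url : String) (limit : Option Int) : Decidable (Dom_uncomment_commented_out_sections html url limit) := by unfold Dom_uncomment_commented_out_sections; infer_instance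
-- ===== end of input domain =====

-- B keeps A's marker-index validation and early return but rebuilds the output by filtering
-- out marker lines in one flat pass instead of splicing slice intervals; objective: simpler.
-- line.strip() == '<!--' / line.strip() == '-->' (shared by both ports and Pre_)
def pvIsC (l : String) : Bool := PySem.Str.strip l == "<!--"
def pvIsU (l : String) : Bool := PySem.Str.strip l == "-->"

-- ===== PORT A =====
def uncomment_commented_out_sections (html : String) (url : String) (limit : Option Int) : String :=
  let lines := PySem.Str.splitlines html
  let comment_line_numbers := ((PySem.List.enumerate lines 0).filter (fun p => pvIsC p.2)).map (fun p => p.1)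
  let uncomment_line_numbers := ((PySem.List.enumerate lines 0).filter (fun p => pvIsU p.2)).map (fun p => p.1)
  -- the asserts only relay debug info (url); Pre_ excludes every input on which they fire
  if comment_line_numbers.isEmpty then html
  else
    let st := (comment_line_numbers.zip uncomment_line_numbers).foldl
      (fun (st : List String × Int) ab =>
        (st.1 ++ PySem.List.slice lines (some (st.2 + 1)) (some ab.1)
              ++ PySem.List.slice lines (some (ab.1 + 1)) (some ab.2), ab.2))
      ([], -1)
    PySem.Str.join "\n" (st.1 ++ PySem.List.slice lines (some (st.2 + 1)) none)

-- ===== PORT B =====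
def uncomment_commented_out_sections_alt (html : String) (url : String) (limit : Option Int) : String :=
  let lines := PySem.Str.splitlines html
  let comment_line_numbers := ((PySem.List.enumerate lines 0).filter (fun p => pvIsC p.2)).map (fun p => p.1)
  -- Source B also builds uncomment_line_numbers, used only in the asserts, which Pre_ discharges
  if comment_line_numbers.isEmpty then html
  else PySem.Str.join "\n" (lines.filter (fun l => !(pvIsC l || pvIsU l)))

-- ===== PRECONDITION & SPEC =====
-- the standalone marker lines, in order, must read <!-- --> <!-- --> … (paired alternation)
def pvAlt : List String → Bool
  | [] => true
  | k1 :: k2 :: rest => k1 == "<!--" && k2 == "-->" && pvAlt rest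
  | _ => false

-- Pre_ excludes (a) inputs on which A's asserts raise (unbalanced marker counts, limit exceeded,
-- a pair out of order) and (b) inputs whose marker lines do not strictly alternate <!--, -->:
-- there A's positional interval splicing keeps an accidental subset of the marker lines while B
-- drops them all — a corner the docstring never specifies.
def Pre_uncomment_commented_out_sections (html : String) (url : String) (limit : Option Int) : Prop :=
  let lines := PySem.Str.splitlines html
  pvAlt ((lines.filter (fun l => pvIsC l || pvIsU l)).map (fun l => PySem.Str.strip l)) = true ∧
  limit.all (fun l => decide (((lines.filter (fun x => pvIsU x)).length : Int) ≤ l)) = true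

instance (html : String) (url : String) (limit : Option Int) : Decidable (Pre_uncomment_commented_out_sections html url limit) := by
  unfold Pre_uncomment_commented_out_sections; infer_instance

def pvWitness_uncomment_commented_out_sections : String × String × Option Int :=
  ("x\n<!--\ny\n-->\nz", "u", none)

def Spec_uncomment_commented_out_sections (html : String) (url : String) (limit : Option Int) (out : String) : Prop := out = uncomment_commented_out_sections_alt html url limit
instance (html : String) (url : String) (limit : Option Int) (out : String) : Decidable (Spec_uncomment_commented_out_sections html url limit out) := by unfold Spec_uncomment_commented_out_sections; infer_instance

-- ===== CLAIM (what is proved, stated in full; the proofs are below) =====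
def Claim_equal_uncomment_commented_out_sections : Prop := ∀ (html : String) (url : String) (limit : Option Int), Dom_uncomment_commented_out_sections html url limit → Pre_uncomment_commented_out_sections html url limit → Spec_uncomment_commented_out_sections html url limit (uncomment_commented_out_sections html url limit)

-- ===== LEMMAS AND PROOFS =====

-- Nat-valued versions of the two index comprehensions
def pvIdxs (f : String → Bool) : List String → Nat → List Nat
  | [], _ => []
  | l :: ls, s => if f l then s :: pvIdxs f ls (s + 1) else pvIdxs f ls (s + 1)

lemma pvIdxs_eq_enum (f : String → Bool) : ∀ (lines : List String) (s : Nat),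
    ((PySem.List.enumerate lines (s : Int)).filter (fun p => f p.2)).map (fun p => p.1)
      = (pvIdxs f lines s).map (fun (n : Nat) => (n : Int)) := by
  intro lines
  induction lines with
  | nil => intro s; simp [pvIdxs, PySem.List.enumerate]
  | cons l ls ih =>
      intro s
      have h1 : ((s : Int) + 1) = ((s + 1 : Nat) : Int) := by push_cast; ring
      rw [PySem.List.enumerate_cons, h1]
      cases hf : f l with
      | true =>
          rw [List.filter_cons_of_pos (by simpa using hf), List.map_cons, ih (s + 1)]
          simp [pvIdxs, hf]
      | false =>
          rw [List.filter_cons_of_neg (by simpa using hf), ih (s + 1)]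
          simp [pvIdxs, hf]

lemma pvIdxs_append (f : String → Bool) : ∀ (xs ys : List String) (s : Nat),
    pvIdxs f (xs ++ ys) s = pvIdxs f xs s ++ pvIdxs f ys (s + xs.length) := by
  intro xs
  induction xs with
  | nil => intro ys s; simp [pvIdxs]
  | cons x xs ih =>
      intro ys s
      simp only [List.cons_append, pvIdxs, ih, List.length_cons]
      by_cases hf : f x <;> simp [hf] <;> ring_nf

lemma pvIdxs_nil_of_not (f : String → Bool) : ∀ (xs : List String) (s : Nat),
    (∀ x ∈ xs, f x = false) → pvIdxs f xs s = [] := by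
  intro xs
  induction xs with
  | nil => intro s _; rfl
  | cons x xs ih =>
      intro s h
      simp only [pvIdxs, h x (by simp)]
      exact ih (s + 1) (fun y hy => h y (by simp [hy]))

-- the splicing loop, in Nat indices; j is i+1
def pvNatSplice (lines : List String) : List (Nat × Nat) → Nat → List String
  | [], j => lines.drop j
  | (a, b) :: ps, j =>
      (lines.drop j).take (a - j) ++ ((lines.drop (a + 1)).take (b - (a + 1))) ++ pvNatSplice lines ps (b + 1)

lemma pvIdxs_add (f : String → Bool) : ∀ (xs : List String) (s : Nat),
    pvIdxs f xs s = (pvIdxs f xs 0).map (fun a => a + s) := by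
  intro xs
  induction xs with
  | nil => intro s; simp [pvIdxs]
  | cons x xs ih =>
      intro s
      simp only [pvIdxs]
      cases hf : f x
      · rw [if_neg (by simp), if_neg (by simp), ih (s + 1), ih 1, List.map_map]
        apply List.map_congr_left; intro a _; simp [Function.comp]; omega
      · rw [if_pos rfl, if_pos rfl, ih (s + 1), ih 1]
        simp only [List.map_map, List.map_cons]
        refine congrArg₂ List.cons (by omega) ?_
        apply List.map_congr_left; intro a _; simp [Function.comp]; omega

lemma pv_drop_add {α : Type} (xs ys : List α) : ∀ (k : Nat),
    (xs ++ ys).drop (k + xs.length) = ys.drop k := by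
  induction xs with
  | nil => intro k; simp
  | cons x xs ih =>
      intro k
      rw [List.cons_append, show k + (x :: xs).length = (k + xs.length) + 1 by simp; omega,
        List.drop_succ_cons, ih]

lemma foldl_splice (lines : List String) : ∀ (ps : List (Nat × Nat)) (acc : List String) (j : Nat),
    ((ps.map (fun (ab : Nat × Nat) => ((ab.1 : Int), (ab.2 : Int)))).foldl
      (fun (st : List String × Int) ab =>
        (st.1 ++ PySem.List.slice lines (some (st.2 + 1)) (some ab.1)
              ++ PySem.List.slice lines (some (ab.1 + 1)) (some ab.2), ab.2))
      (acc, (j : Int) - 1)).1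
    ++ PySem.List.slice lines (some (((ps.map (fun (ab : Nat × Nat) => ((ab.1 : Int), (ab.2 : Int)))).foldl
      (fun (st : List String × Int) ab =>
        (st.1 ++ PySem.List.slice lines (some (st.2 + 1)) (some ab.1)
              ++ PySem.List.slice lines (some (ab.1 + 1)) (some ab.2), ab.2))
      (acc, (j : Int) - 1)).2 + 1)) none
    = acc ++ pvNatSplice lines ps j := by
  intro ps
  induction ps with
  | nil =>
      intro acc j
      have h : ((j : Int) - 1 + 1) = ((j : Nat) : Int) := by ring
      simp only [List.map_nil, List.foldl_nil, h, PySem.List.slice_from_natCast]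
      rfl
  | cons ab ps ih =>
      obtain ⟨a, b⟩ := ab
      intro acc j
      have h1 : ((j : Int) - 1 + 1) = ((j : Nat) : Int) := by ring
      have h2 : ((a : Nat) : Int) + 1 = ((a + 1 : Nat) : Int) := by push_cast; ring
      have hb : ((b : Nat) : Int) = ((b + 1 : Nat) : Int) - 1 := by push_cast; ring
      simp only [List.map_cons, List.foldl_cons]
      simp only [h1, h2, PySem.List.slice_natCast]
      rw [hb, ih]
      simp [pvNatSplice, List.append_assoc]

lemma pvNatSplice_shift (xs ys : List String) : ∀ (ps : List (Nat × Nat)) (j : Nat),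
    pvNatSplice (xs ++ ys) (ps.map (fun ab => (ab.1 + xs.length, ab.2 + xs.length))) (j + xs.length)
      = pvNatSplice ys ps j := by
  intro ps
  induction ps with
  | nil => intro j; simp only [List.map_nil, pvNatSplice, pv_drop_add]
  | cons ab ps ih =>
      obtain ⟨a, b⟩ := ab
      intro j
      simp only [List.map_cons, pvNatSplice]
      rw [show a + xs.length + 1 = (a + 1) + xs.length by omega,
          show b + xs.length + 1 = (b + 1) + xs.length by omega,
          show a + xs.length - (j + xs.length) = a - j by omega,
          show b + xs.length - (a + 1 + xs.length) = b - (a + 1) by omega,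
          pv_drop_add, pv_drop_add, ih (b + 1)]

lemma pvFilter_extract (k : String) : ∀ (lines : List String) (rest : List String),
    ((lines.filter (fun l => pvIsC l || pvIsU l)).map (fun l => PySem.Str.strip l)) = k :: rest →
    ∃ p m r, lines = p ++ m :: r ∧ (∀ x ∈ p, (pvIsC x || pvIsU x) = false) ∧
      PySem.Str.strip m = k ∧ ((r.filter (fun l => pvIsC l || pvIsU l)).map (fun l => PySem.Str.strip l)) = rest := by
  intro lines
  induction lines with
  | nil => intro rest h; simp at h
  | cons l ls ih =>
      intro rest h
      by_cases hm : (pvIsC l || pvIsU l) = true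
      · rw [List.filter_cons, if_pos hm, List.map_cons] at h
        injection h with h1 h2
        exact ⟨[], l, ls, by simp, by simp, h1, h2⟩
      · rw [List.filter_cons, if_neg hm] at h
        obtain ⟨p, m, r, hl, hp, hsm, hr⟩ := ih rest h
        refine ⟨l :: p, m, r, by simp [hl], ?_, hsm, hr⟩
        intro x hx
        rcases List.mem_cons.mp hx with hx | hx
        · subst hx; simpa using hm
        · exact hp x hx

lemma pv_zip_cast (A B : List Nat) :
    (A.map (fun (n : Nat) => (n : Int))).zip (B.map (fun (n : Nat) => (n : Int)))
      = (A.zip B).map (fun (ab : Nat × Nat) => ((ab.1 : Int), (ab.2 : Int))) := by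
  induction A generalizing B with
  | nil => simp
  | cons a as ih =>
      cases B with
      | nil => simp
      | cons b bs => simp [ih]

lemma pvIdxs_block (f : String → Bool) (p q r : List String) (m1 m2 : String)
    (hp : ∀ x ∈ p, f x = false) (hq : ∀ x ∈ q, f x = false)
    (h1 : f m1 = true) (h2 : f m2 = false) :
    pvIdxs f (p ++ m1 :: (q ++ m2 :: r)) 0
      = p.length :: (pvIdxs f r 0).map (fun a => a + (p.length + q.length + 2)) := by
  rw [pvIdxs_append, pvIdxs_nil_of_not f p 0 hp, List.nil_append]
  rw [show pvIdxs f (m1 :: (q ++ m2 :: r)) (0 + p.length)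
      = (0 + p.length) :: pvIdxs f (q ++ m2 :: r) (0 + p.length + 1) from by simp [pvIdxs, h1]]
  rw [pvIdxs_append, pvIdxs_nil_of_not f q _ hq, List.nil_append]
  rw [show pvIdxs f (m2 :: r) (0 + p.length + 1 + q.length)
      = pvIdxs f r (0 + p.length + 1 + q.length + 1) from by simp [pvIdxs, h2]]
  rw [pvIdxs_add f r (0 + p.length + 1 + q.length + 1)]
  refine congrArg₂ List.cons (by omega) ?_
  apply List.map_congr_left; intro a _; omega

lemma pvIdxs_block2 (f : String → Bool) (p q r : List String) (m1 m2 : String)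
    (hp : ∀ x ∈ p, f x = false) (hq : ∀ x ∈ q, f x = false)
    (h1 : f m1 = false) (h2 : f m2 = true) :
    pvIdxs f (p ++ m1 :: (q ++ m2 :: r)) 0
      = (p.length + q.length + 1) :: (pvIdxs f r 0).map (fun a => a + (p.length + q.length + 2)) := by
  rw [pvIdxs_append, pvIdxs_nil_of_not f p 0 hp, List.nil_append]
  rw [show pvIdxs f (m1 :: (q ++ m2 :: r)) (0 + p.length)
      = pvIdxs f (q ++ m2 :: r) (0 + p.length + 1) from by simp [pvIdxs, h1]]
  rw [pvIdxs_append, pvIdxs_nil_of_not f q _ hq, List.nil_append]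
  rw [show pvIdxs f (m2 :: r) (0 + p.length + 1 + q.length)
      = (0 + p.length + 1 + q.length) :: pvIdxs f r (0 + p.length + 1 + q.length + 1) from by
        simp [pvIdxs, h2]]
  rw [pvIdxs_add f r (0 + p.length + 1 + q.length + 1)]
  refine congrArg₂ List.cons (by omega) ?_
  apply List.map_congr_left; intro a _; omega

lemma pv_main : ∀ (n : Nat) (lines : List String), lines.length ≤ n →
    pvAlt ((lines.filter (fun l => pvIsC l || pvIsU l)).map (fun l => PySem.Str.strip l)) = true →
    pvNatSplice lines ((pvIdxs pvIsC lines 0).zip (pvIdxs pvIsU lines 0)) 0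
      = lines.filter (fun l => !(pvIsC l || pvIsU l)) := by
  intro n
  induction n with
  | zero =>
      intro lines hlen _
      have h : lines = [] := List.eq_nil_of_length_eq_zero (Nat.le_zero.mp hlen)
      subst h; simp [pvIdxs, pvNatSplice]
  | succ n ih =>
      intro lines hlen halt
      cases hk : (lines.filter (fun l => pvIsC l || pvIsU l)).map (fun l => PySem.Str.strip l) with
      | nil =>
          have hlen0 := congrArg List.length hk
          simp only [List.length_map, List.length_nil] at hlen0
          have hfil : lines.filter (fun l => pvIsC l || pvIsU l) = [] :=
            List.eq_nil_of_length_eq_zero hlen0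
          have hno : ∀ x ∈ lines, (pvIsC x || pvIsU x) = false := by
            intro x hx
            by_contra hcon
            have ht : (pvIsC x || pvIsU x) = true := by
              revert hcon; cases (pvIsC x || pvIsU x) <;> simp
            have hmem : x ∈ lines.filter (fun l => pvIsC l || pvIsU l) :=
              List.mem_filter.mpr ⟨hx, ht⟩
            simp [hfil] at hmem
          have hnoC : ∀ x ∈ lines, pvIsC x = false :=
            fun x hx => (Bool.or_eq_false_iff.mp (hno x hx)).1
          rw [pvIdxs_nil_of_not pvIsC lines 0 hnoC]
          rw [show (([] : List Nat).zip (pvIdxs pvIsU lines 0)) = ([] : List (Nat × Nat)) from rfl]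
          simp only [pvNatSplice, List.drop_zero]
          rw [List.filter_eq_self.mpr (fun a ha => by simp [hno a ha])]
      | cons k1 rest1 =>
          rw [hk] at halt
          cases rest1 with
          | nil => simp [pvAlt] at halt
          | cons k2 rest =>
              simp only [pvAlt, Bool.and_eq_true, beq_iff_eq] at halt
              obtain ⟨⟨hk1, hk2⟩, hrest⟩ := halt
              obtain ⟨p, m1, r1, hl1, hp, hm1, hr1⟩ :=
                pvFilter_extract "<!--" lines (k2 :: rest) (by rw [hk, hk1])
              obtain ⟨q, m2, r, hl2, hq, hm2, hr⟩ :=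
                pvFilter_extract "-->" r1 rest (by rw [hr1, hk2])
              subst hl2
              subst hl1
              have hCm1 : pvIsC m1 = true := by simp [pvIsC, hm1]
              have hUm1 : pvIsU m1 = false := by simp [pvIsU, hm1]
              have hCm2 : pvIsC m2 = false := by simp [pvIsC, hm2]
              have hUm2 : pvIsU m2 = true := by simp [pvIsU, hm2]
              have hpC : ∀ x ∈ p, pvIsC x = false :=
                fun x hx => (Bool.or_eq_false_iff.mp (hp x hx)).1
              have hpU : ∀ x ∈ p, pvIsU x = false :=
                fun x hx => (Bool.or_eq_false_iff.mp (hp x hx)).2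
              have hqC : ∀ x ∈ q, pvIsC x = false :=
                fun x hx => (Bool.or_eq_false_iff.mp (hq x hx)).1
              have hqU : ∀ x ∈ q, pvIsU x = false :=
                fun x hx => (Bool.or_eq_false_iff.mp (hq x hx)).2
              have hrlen : r.length ≤ n := by
                simp only [List.length_append, List.length_cons] at hlen
                omega
              have hIH := ih r hrlen (by rw [hr]; exact hrest)
              rw [pvIdxs_block pvIsC p q r m1 m2 hpC hqC hCm1 hCm2,
                  pvIdxs_block2 pvIsU p q r m1 m2 hpU hqU hUm1 hUm2,
                  List.zip_cons_cons, List.zip_map]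
              rw [show (Prod.map (fun a => a + (p.length + q.length + 2))
                    (fun a => a + (p.length + q.length + 2))) =
                  (fun (ab : Nat × Nat) =>
                    (ab.1 + (p ++ m1 :: q ++ [m2]).length, ab.2 + (p ++ m1 :: q ++ [m2]).length)) from by
                funext ab; obtain ⟨a, b⟩ := ab
                simp only [Prod.map, Prod.mk.injEq, List.length_append, List.length_cons,
                  List.length_nil]
                omega]
              simp only [pvNatSplice, List.drop_zero, Nat.sub_zero]
              rw [List.take_left' rfl]
              rw [show p ++ m1 :: (q ++ m2 :: r) = (p ++ [m1]) ++ (q ++ m2 :: r) from by simp,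
                  show p.length + 1 = 0 + (p ++ [m1]).length from by
                    simp only [List.length_append, List.length_cons, List.length_nil]; omega,
                  pv_drop_add, List.drop_zero,
                  show p.length + q.length + 1 - (0 + (p ++ [m1]).length) = q.length from by
                    simp only [List.length_append, List.length_cons, List.length_nil]; omega,
                  List.take_left' rfl]
              rw [show (p ++ [m1]) ++ (q ++ m2 :: r) = (p ++ m1 :: q ++ [m2]) ++ r from by simp,
                  show p.length + q.length + 1 + 1 = 0 + (p ++ m1 :: q ++ [m2]).length from by
                    simp only [List.length_append, List.length_cons, List.length_nil]; omega,
                  pvNatSplice_shift, hIH]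
              have hfpq : ((p ++ m1 :: q) ++ [m2]).filter (fun l => !(pvIsC l || pvIsU l))
                  = p ++ q := by
                rw [List.filter_append, List.filter_append, List.filter_cons,
                    if_neg (by simp [hCm1]),
                    List.filter_eq_self.mpr (fun a ha => by simp [hp a ha]),
                    List.filter_eq_self.mpr (fun a ha => by simp [hq a ha])]
                simp [hUm2]
              rw [List.filter_append, hfpq]

-- ===== VERDICT (by name: the statement is the Claim_ definition above) =====
theorem uncomment_commented_out_sections_spec : Claim_equal_uncomment_commented_out_sections := by
  intro html url limit hdom hpre
  obtain ⟨halt, -⟩ := hpre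
  unfold Spec_uncomment_commented_out_sections uncomment_commented_out_sections
    uncomment_commented_out_sections_alt
  have hC0 := pvIdxs_eq_enum pvIsC (PySem.Str.splitlines html) 0
  have hU0 := pvIdxs_eq_enum pvIsU (PySem.Str.splitlines html) 0
  rw [Nat.cast_zero] at hC0 hU0
  simp only [hC0, hU0]
  by_cases hA : pvIdxs pvIsC (PySem.Str.splitlines html) 0 = []
  · simp [hA]
  · have hcond : ¬ ((((pvIdxs pvIsC (PySem.Str.splitlines html) 0).map
        (fun (n : Nat) => (n : Int))).isEmpty) = true) := by
      simpa [List.isEmpty_iff, List.map_eq_nil_iff] using hA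
    rw [if_neg hcond, if_neg hcond]
    rw [pv_zip_cast,
        show ((-1 : Int)) = ((0 : Nat) : Int) - 1 from by norm_num]
    rw [foldl_splice (PySem.Str.splitlines html)
      ((pvIdxs pvIsC (PySem.Str.splitlines html) 0).zip (pvIdxs pvIsU (PySem.Str.splitlines html) 0))
      [] 0, List.nil_append,
      pv_main (PySem.Str.splitlines html).length (PySem.Str.splitlines html) (le_refl _) halt]
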